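-- pv_equiv track=rewrite | github.com/gkpotter/mqt-qudits | src/mqt/qudits/compiler/state_compilation/retrieve_state.py | find_entries_indices
-- ===== SOURCE A (Python) =====
-- def find_entries_indices(input_list: list[list[int]], sublist: list[list[int]]) -> list[int]:
--     indices = []
--
--     for state in sublist:
--         id = True
--         for i in range(len(input_list)):
--             for j in range(len(input_list[i])):
--                 if input_list[i][j] != state[j]:
--                     id = False
--                     break
--             if id:
--                 indices.append(i)
--             id = True
--
--     indices.sort()
--     return indices
-- ===== SOURCE B (Python) =====
-- def find_entries_indices(input_list: list[list[int]], sublist: list[list[int]]) -> list[int]: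
--     # A row matches a state when the row is a leading prefix of it.  Index the
--     # rows once by tuple, then answer each state by looking up its prefixes.
--     index = {}
--     for i, row in enumerate(input_list):
--         index.setdefault(tuple(row), []).append(i)
--     out = []
--     for state in sublist:
--         for l in range(len(state) + 1):
--             out.extend(index.get(tuple(state[:l]), []))
--     out.sort()
--     return out
-- ===== Notes on version B (the rewrite author's own statement) =====
-- stated objective: faster
-- what changed: B builds a dict from row-tuple to its indices in one pass and answers each state by looking up the state's prefixes, removing A's per-state scan over all rows with element-by-element comparison; Pre_ excludes only the inputs where A raises IndexError (a row longer than a state it matches over the state's whole length).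
import Mathlib
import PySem

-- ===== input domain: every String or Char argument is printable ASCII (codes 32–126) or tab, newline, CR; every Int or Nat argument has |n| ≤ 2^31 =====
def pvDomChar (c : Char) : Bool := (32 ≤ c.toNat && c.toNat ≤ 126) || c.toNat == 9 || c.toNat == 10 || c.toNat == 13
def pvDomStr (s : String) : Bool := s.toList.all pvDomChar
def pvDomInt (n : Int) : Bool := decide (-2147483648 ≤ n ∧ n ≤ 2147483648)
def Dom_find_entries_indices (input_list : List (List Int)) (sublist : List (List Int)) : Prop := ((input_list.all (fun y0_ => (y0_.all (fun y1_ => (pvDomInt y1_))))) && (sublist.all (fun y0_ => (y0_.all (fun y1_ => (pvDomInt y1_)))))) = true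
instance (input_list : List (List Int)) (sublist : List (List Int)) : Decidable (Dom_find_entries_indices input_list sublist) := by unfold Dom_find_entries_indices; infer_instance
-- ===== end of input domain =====

-- B indexes the rows in a dict (tuple -> indices) and answers each state by
-- looking up the state's prefixes, replacing A's per-state scan over all rows
-- (objective: faster).

-- ===== PORT A =====
-- A's inner 'for j in range(len(input_list[i]))' loop with its break:
-- 'input_list[i][j]' / 'state[j]' are Python indexing; the IndexError 'state[j]'
-- can raise lies outside Pre_, where this port's pyGetD default is never reached.
def pvAInner (row state : List Int) : List Int → Bool
  | [] => true
  | j :: js =>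
      if PySem.List.pyGetD row j 0 ≠ PySem.List.pyGetD state j 0 then false
      else pvAInner row state js

def find_entries_indices (input_list : List (List Int)) (sublist : List (List Int)) : List Int :=
  let indices : List Int :=
    sublist.foldl (fun acc state =>
      (PySem.List.pyRange 0 input_list.length 1).foldl (fun acc2 i =>
        if pvAInner (PySem.List.pyGetD input_list i []) state
            (PySem.List.pyRange 0 (PySem.List.pyGetD input_list i []).length 1)
        then acc2 ++ [i] else acc2) acc) []
  PySem.List.sorted indices (fun x => x) false

-- ===== PORT B =====
def find_entries_indices_alt (input_list : List (List Int)) (sublist : List (List Int)) : List Int :=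
  -- index.setdefault(tuple(row), []).append(i)
  let index : PySem.Dict (List Int) (List Int) :=
    (PySem.List.enumerate input_list).foldl
      (fun d p => d.modify p.2 [] (· ++ [p.1])) PySem.Dict.empty
  -- for l in range(len(state)+1): out.extend(index.get(tuple(state[:l]), []))
  let out : List Int :=
    sublist.foldl (fun out state =>
      (PySem.List.pyRange 0 ((state.length : Int) + 1) 1).foldl
        (fun out2 l => out2 ++ index.getD (PySem.List.slice state none (some l)) []) out) []
  PySem.List.sorted out (fun x => x) false

-- ===== PRECONDITION & SPEC =====
-- Exactly the inputs on which A returns: A raises IndexError on 'state[j]' iff some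
-- row is longer than some state whose whole length it matches elementwise.
def Pre_find_entries_indices (input_list : List (List Int)) (sublist : List (List Int)) : Prop :=
  ∀ row ∈ input_list, ∀ s ∈ sublist, ¬ (s.length < row.length ∧ row.take s.length = s)
instance (input_list : List (List Int)) (sublist : List (List Int)) : Decidable (Pre_find_entries_indices input_list sublist) := by unfold Pre_find_entries_indices; infer_instance

def pvWitness_find_entries_indices : List (List Int) × List (List Int) :=
  ([[0, 1], [1, 0]], [[1, 0], [0, 1]])

def Spec_find_entries_indices (input_list : List (List Int)) (sublist : List (List Int)) (out : List Int) : Prop := out = find_entries_indices_alt input_list sublist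
instance (input_list : List (List Int)) (sublist : List (List Int)) (out : List Int) : Decidable (Spec_find_entries_indices input_list sublist out) := by unfold Spec_find_entries_indices; infer_instance

-- ===== CLAIM (what is proved, stated in full; the proofs are below) =====
def Claim_equal_find_entries_indices : Prop := ∀ (input_list : List (List Int)) (sublist : List (List Int)), Dom_find_entries_indices input_list sublist → Pre_find_entries_indices input_list sublist → Spec_find_entries_indices input_list sublist (find_entries_indices input_list sublist)

-- ===== LEMMAS AND PROOFS =====

-- A's inner loop (with break) answers: do row and state agree at every index of the range?
theorem pvAInner_eq_all (row state : List Int) (js : List Int) :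
    pvAInner row state js
      = js.all (fun j => PySem.List.pyGetD row j 0 == PySem.List.pyGetD state j 0) := by
  induction js with
  | nil => rfl
  | cons j js ih => by_cases h : PySem.List.pyGetD row j 0 = PySem.List.pyGetD state j 0 <;>
      simp [pvAInner, h, ih]

theorem take_eq_of_getD (row s : List Int) (n : Nat) (hn : n ≤ row.length)
    (h : ∀ k, k < n → row.getD k 0 = s.getD k 0) (hle : n ≤ s.length) :
    row.take n = s.take n := by
  apply List.ext_getElem (by simp; omega)
  intro k h1 h2
  have hk : k < n := by simp at h1; omega
  have := h k hk
  simpa [List.getD_eq_getElem?_getD, List.getElem?_eq_getElem,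
    (by omega : k < row.length), (by omega : k < s.length)] using this

-- Under Pre_'s per-pair condition, A's scan decides the prefix test.
theorem pvAInner_iff_prefix (row s : List Int)
    (hP : ¬ (s.length < row.length ∧ row.take s.length = s)) :
    pvAInner row s (PySem.List.pyRange 0 row.length 1) = true
      ↔ (row.length ≤ s.length ∧ row = s.take row.length) := by
  rw [pvAInner_eq_all]
  simp only [List.all_eq_true, PySem.List.mem_pyRange_one, beq_iff_eq]
  constructor
  · intro h
    have hD : ∀ k : Nat, k < row.length → row.getD k 0 = s.getD k 0 := by
      intro k hk
      have := h (k : Int) ⟨by positivity, by exact_mod_cast hk⟩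
      simpa [PySem.List.pyGetD_natCast] using this
    by_cases hle : row.length ≤ s.length
    · refine ⟨hle, ?_⟩
      have := take_eq_of_getD row s row.length le_rfl hD hle
      simpa using this
    · exfalso
      apply hP
      refine ⟨by omega, ?_⟩
      have := take_eq_of_getD row s s.length (by omega) (fun k hk => hD k (by omega)) le_rfl
      simpa using this
  · rintro ⟨hle, heq⟩
    intro j ⟨hj0, hjl⟩
    lift j to Nat using hj0
    simp only [PySem.List.pyGetD_natCast]
    have hjn : j < row.length := by exact_mod_cast hjl
    have : row.getD j 0 = (s.take row.length).getD j 0 := by rw [← heq]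
    rw [this]
    simp [List.getD_eq_getElem?_getD, hjn, (by omega : j < s.length), List.getElem_take]

-- A's outer two loops build, state by state, the concatenation of the per-state index lists.
theorem aFold (input_list : List (List Int)) (sl : List (List Int)) (acc : List Int) :
    sl.foldl (fun acc state =>
      (PySem.List.pyRange 0 input_list.length 1).foldl (fun acc2 i =>
        if pvAInner (PySem.List.pyGetD input_list i []) state
            (PySem.List.pyRange 0 (PySem.List.pyGetD input_list i []).length 1)
        then acc2 ++ [i] else acc2) acc) acc
    = acc ++ sl.flatMap (fun s => (PySem.List.pyRange 0 input_list.length 1).filter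
        (fun i => pvAInner (PySem.List.pyGetD input_list i []) s
          (PySem.List.pyRange 0 (PySem.List.pyGetD input_list i []).length 1))) := by
  induction sl generalizing acc with
  | nil => simp
  | cons s ss ih =>
    simp only [List.foldl_cons, List.flatMap_cons]
    rw [PySem.List.foldl_append_if_eq_filter, ih, List.append_assoc]

theorem aShape (input_list sublist : List (List Int)) :
    find_entries_indices input_list sublist
      = PySem.List.sorted (sublist.flatMap (fun s =>
          (PySem.List.pyRange 0 input_list.length 1).filter
            (fun i => pvAInner (PySem.List.pyGetD input_list i []) s
              (PySem.List.pyRange 0 (PySem.List.pyGetD input_list i []).length 1))))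
          (fun x => x) false := by
  unfold find_entries_indices
  simp only [aFold, List.nil_append]

-- B's dict lookup for a key is the list of indices of rows equal to it, in index order.
theorem bLookup (input_list : List (List Int)) (s : List Int) :
    ((PySem.List.enumerate input_list).foldl
        (fun d p => d.modify p.2 [] (· ++ [p.1])) PySem.Dict.empty).getD s []
      = (PySem.List.pyRange 0 input_list.length 1).filter
          (fun i => PySem.List.pyGetD input_list i [] == s) := by
  have hswap : (PySem.List.enumerate input_list).foldl
        (fun d p => d.modify p.2 [] (· ++ [p.1])) PySem.Dict.empty
      = ((PySem.List.enumerate input_list).map Prod.swap).foldl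
        (fun d p => d.modify p.1 [] (· ++ [p.2])) PySem.Dict.empty := by
    rw [List.foldl_map]
    simp [Prod.swap]
  rw [hswap, PySem.Dict.getD_foldl_modify_append,
    PySem.List.enumerate_eq_map_pyRange input_list ([] : List Int)]
  simp [List.map_map, List.filter_map, Function.comp_def]

theorem bShape (input_list sublist : List (List Int)) :
    find_entries_indices_alt input_list sublist
      = PySem.List.sorted (sublist.flatMap (fun s =>
          (PySem.List.pyRange 0 ((s.length : Int) + 1) 1).flatMap (fun l =>
            (PySem.List.pyRange 0 input_list.length 1).filter
              (fun i => PySem.List.pyGetD input_list i []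
                  == PySem.List.slice s none (some l)))))
          (fun x => x) false := by
  unfold find_entries_indices_alt
  dsimp only
  congr 1
  have h1 : sublist.foldl (fun out state =>
      (PySem.List.pyRange 0 ((state.length : Int) + 1) 1).foldl
        (fun out2 l => out2 ++
          ((PySem.List.enumerate input_list).foldl
            (fun d p => d.modify p.2 [] (· ++ [p.1])) PySem.Dict.empty).getD
              (PySem.List.slice state none (some l)) []) out) []
    = sublist.foldl (fun out s => out ++
        (PySem.List.pyRange 0 ((s.length : Int) + 1) 1).flatMap (fun l =>
          (PySem.List.pyRange 0 input_list.length 1).filter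
            (fun i => PySem.List.pyGetD input_list i []
                == PySem.List.slice s none (some l)))) [] := by
    apply PySem.List.foldl_congr_mem
    intro acc s _
    rw [PySem.List.foldl_append_eq_flatMap]
    congr 1
    exact List.flatMap_congr (fun l _ => bLookup input_list _)
  rw [h1, PySem.List.foldl_append_eq_flatMap, List.nil_append]

theorem mem_row (input_list : List (List Int)) (i : Int)
    (h : 0 ≤ i ∧ i < (input_list.length : Int)) :
    PySem.List.pyGetD input_list i [] ∈ input_list :=
  PySem.List.pyGetD_mem input_list ([] : List Int)
    (by simp [PySem.Raise.InRange]; omega)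

theorem count_flatMap {α : Type} (l : List α) (f : α → List Int) (x : Int) :
    (l.flatMap f).count x = (l.map (fun a => (f a).count x)).sum := by
  induction l with
  | nil => rfl
  | cons a t ih => simp [List.count_append, ih]

theorem count_filter_eq (l : List Int) (p : Int → Bool) (x : Int) :
    (l.filter p).count x = if p x then l.count x else 0 := by
  rw [List.count_eq_countP, List.countP_filter]
  split_ifs with h
  · rw [List.count_eq_countP]
    exact List.countP_congr (fun y hy => by by_cases hxy : y = x <;> simp [hxy, h])
  · apply List.countP_eq_zero.mpr
    intro y hy
    by_cases hxy : y = x <;> simp [hxy, h]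

theorem sum_map_ite_one_zero_nat {α : Type} (l : List α) (p : α → Bool) :
    (l.map (fun a => if p a then 1 else 0)).sum = l.countP p := by
  induction l with
  | nil => rfl
  | cons a t ih => by_cases h : p a <;> simp [h, ih, Nat.add_comm]

-- how many prefix lengths of s produce row: one if row is a prefix of s, else none
theorem countP_prefix (row s : List Int) :
    (PySem.List.pyRange 0 ((s.length : Int) + 1) 1).countP
        (fun l => row == PySem.List.slice s none (some l))
      = if row.length ≤ s.length ∧ row = s.take row.length then 1 else 0 := by
  have hslice : ∀ l : Int, l ∈ PySem.List.pyRange 0 ((s.length : Int) + 1) 1 →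
      PySem.List.slice s none (some l) = s.take l.toNat := by
    intro l hl
    obtain ⟨h0, _⟩ := PySem.List.mem_pyRange_one.mp hl
    obtain ⟨m, rfl⟩ := Int.eq_ofNat_of_zero_le h0
    rw [PySem.List.slice_to_natCast]
    simp
  split_ifs with h
  · obtain ⟨hle, heq⟩ := h
    rw [List.countP_congr (q := fun l => l == (row.length : Int))
      (fun l hl => by
        obtain ⟨h0, hlt⟩ := PySem.List.mem_pyRange_one.mp hl
        rw [hslice l hl]
        by_cases hr : row = List.take l.toNat s
        · have hlen : row.length = min l.toNat s.length := by rw [hr]; simp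
          have hleq : l = (row.length : Int) := by omega
          subst hleq
          simp only [Int.toNat_natCast]
          rw [← heq]
          simp
        · have hne : l ≠ (row.length : Int) := fun hc => hr (by rw [hc]; simpa using heq)
          simp [hr, hne])]
    rw [List.count_eq_countP.symm]
    exact List.count_eq_one_of_mem (PySem.List.nodup_pyRange_one 0 _)
      (PySem.List.mem_pyRange_one.mpr ⟨by positivity, by omega⟩)
  · apply List.countP_eq_zero.mpr
    intro l hl
    simp only [hslice l hl, beq_iff_eq]
    intro hr
    apply h
    have hlen : row.length = min l.toNat s.length := by rw [hr]; simp
    obtain ⟨h0, hlt⟩ := PySem.List.mem_pyRange_one.mp hl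
    refine ⟨by omega, ?_⟩
    rw [show row.length = l.toNat from by omega]
    exact hr

-- per state: B's prefix lookups are a permutation of A's matching-row scan
theorem perState (input_list : List (List Int)) (s : List Int)
    (hP : ∀ row ∈ input_list, ¬ (s.length < row.length ∧ row.take s.length = s)) :
    ((PySem.List.pyRange 0 ((s.length : Int) + 1) 1).flatMap (fun l =>
        (PySem.List.pyRange 0 input_list.length 1).filter
          (fun i => PySem.List.pyGetD input_list i []
              == PySem.List.slice s none (some l)))).Perm
      ((PySem.List.pyRange 0 input_list.length 1).filter
        (fun i => pvAInner (PySem.List.pyGetD input_list i []) s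
          (PySem.List.pyRange 0 (PySem.List.pyGetD input_list i []).length 1))) := by
  apply List.perm_iff_count.mpr
  intro x
  rw [count_flatMap, count_filter_eq]
  by_cases hx : x ∈ PySem.List.pyRange 0 input_list.length 1
  · have hc1 : (PySem.List.pyRange 0 input_list.length 1).count x = 1 :=
      List.count_eq_one_of_mem (PySem.List.nodup_pyRange_one 0 _) hx
    have hmem := mem_row input_list x (PySem.List.mem_pyRange_one.mp hx)
    have hAB : pvAInner (PySem.List.pyGetD input_list x []) s
        (PySem.List.pyRange 0 (PySem.List.pyGetD input_list x []).length 1)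
        = decide ((PySem.List.pyGetD input_list x []).length ≤ s.length ∧
            PySem.List.pyGetD input_list x []
              = s.take (PySem.List.pyGetD input_list x []).length) := by
    -- both sides are the prefix test, by pvAInner_iff_prefix
      rw [Bool.eq_iff_iff, decide_eq_true_iff]
      exact pvAInner_iff_prefix _ s (hP _ hmem)
    calc ((PySem.List.pyRange 0 ((s.length : Int) + 1) 1).map (fun l =>
          ((PySem.List.pyRange 0 input_list.length 1).filter
            (fun i => PySem.List.pyGetD input_list i []
                == PySem.List.slice s none (some l))).count x)).sum
        = ((PySem.List.pyRange 0 ((s.length : Int) + 1) 1).map (fun l =>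
            if PySem.List.pyGetD input_list x [] == PySem.List.slice s none (some l)
            then 1 else 0)).sum := by
          congr 1
          apply List.map_congr_left
          intro l _
          rw [count_filter_eq]
          split_ifs <;> simp [hc1]
      _ = (PySem.List.pyRange 0 ((s.length : Int) + 1) 1).countP
            (fun l => PySem.List.pyGetD input_list x []
                == PySem.List.slice s none (some l)) :=
          sum_map_ite_one_zero_nat _ _
      _ = _ := by
          rw [countP_prefix, hAB, hc1]
          simp only [decide_eq_true_eq]
  · have hc0 : (PySem.List.pyRange 0 input_list.length 1).count x = 0 :=
      List.count_eq_zero.mpr hx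
    rw [hc0, ite_self]
    apply List.sum_eq_zero
    intro n hn
    obtain ⟨l, hl, rfl⟩ := List.mem_map.mp hn
    rw [count_filter_eq]
    split_ifs <;> simp [hc0]

-- ===== VERDICT (by name: the statements are the Claim_ definitions above) =====
theorem find_entries_indices_spec : Claim_equal_find_entries_indices := by
  intro il sl _ hP
  unfold Spec_find_entries_indices
  rw [aShape, bShape]
  apply (PySem.List.sorted_id_eq_sorted_id_iff_perm _ _).mpr
  apply List.Perm.flatMap_left
  intro s hs
  exact (perState il s (fun row hrow => hP row hrow s hs)).symm
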